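-- pv_equiv track=rewrite | github.com/teru01/python_algorithms | abc114-c.py | is_753
-- ===== SOURCE A (Python) =====
-- def is_753(n):
-- 	s = str(n)
-- 	f = [0,0,0]
-- 	for c in s:
-- 		if c == '3':
-- 			f[0] = 1
-- 		elif c == '5':
-- 			f[1] = 1
-- 		elif c == '7':
-- 			f[2] = 1
-- 	if all(f):
-- 		return True
-- 	else:
-- 		return False
-- ===== SOURCE B (Python) =====
-- def is_753(n):
--     s = str(n)
--     return all(c in s for c in "357")
-- ===== Notes on version B (the rewrite author's own statement) =====
-- stated objective: idiomatic
-- what changed: B iterates over the three target characters '3','5','7' testing each for membership in str(n), instead of A's digit-by-digit sweep that sets flag cells in a list and checks all(f).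
import Mathlib
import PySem

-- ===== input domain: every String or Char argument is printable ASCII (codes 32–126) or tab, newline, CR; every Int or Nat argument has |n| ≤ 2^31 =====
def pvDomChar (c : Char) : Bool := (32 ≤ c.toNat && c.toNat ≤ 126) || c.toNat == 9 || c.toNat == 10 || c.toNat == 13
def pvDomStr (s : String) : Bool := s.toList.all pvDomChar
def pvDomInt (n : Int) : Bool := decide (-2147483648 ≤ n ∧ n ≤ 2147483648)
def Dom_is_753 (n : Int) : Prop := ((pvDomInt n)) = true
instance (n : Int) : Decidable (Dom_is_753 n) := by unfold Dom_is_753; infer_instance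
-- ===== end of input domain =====

-- B tests each target character '3','5','7' for membership in str(n), instead of A's
-- digit-sweep setting flag cells; idiomatic, same cost, different traversal shape.


-- ===== PORT A =====
-- the loop: for c in s, setting flag cells in order
def is753Loop (f : Int × Int × Int) (cs : List Char) : Int × Int × Int :=
  cs.foldl (fun f c =>
    if c = '3' then (1, f.2.1, f.2.2)
    else if c = '5' then (f.1, 1, f.2.2)
    else if c = '7' then (f.1, f.2.1, 1)
    else f) f

def is_753 (n : Int) : Bool :=
  let s := PySem.Int.toChars n
  let f := is753Loop (0, 0, 0) s
  -- all(f): every element of the list [f0,f1,f2] is truthy (nonzero)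
  if f.1 ≠ 0 ∧ f.2.1 ≠ 0 ∧ f.2.2 ≠ 0 then true else false

-- ===== PORT B =====
def is_753_alt (n : Int) : Bool :=
  let s := PySem.Int.toChars n
  ['3', '5', '7'].all (fun c => c ∈ s)

-- ===== PRECONDITION & SPEC =====
def Spec_is_753 (n : Int) (out : Bool) : Prop := out = is_753_alt n
instance (n : Int) (out : Bool) : Decidable (Spec_is_753 n out) := by unfold Spec_is_753; infer_instance

-- ===== CLAIM (what is proved, stated in full; the proofs are below) =====
def Claim_equal_is_753 : Prop := ∀ (n : Int), Dom_is_753 n → Spec_is_753 n (is_753 n)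

-- ===== LEMMAS AND PROOFS =====
theorem is753Loop_spec (cs : List Char) (f : Int × Int × Int) :
    is753Loop f cs =
      ((if '3' ∈ cs then 1 else f.1),
       (if '5' ∈ cs then 1 else f.2.1),
       (if '7' ∈ cs then 1 else f.2.2)) := by
  induction cs generalizing f with
  | nil => simp [is753Loop]
  | cons c cs ih =>
    simp only [is753Loop, List.foldl_cons] at *
    rw [ih]
    rcases f with ⟨f0, f1, f2⟩
    by_cases h3 : c = '3' <;> by_cases h5 : c = '5' <;> by_cases h7 : c = '7' <;>
      subst_vars <;> simp_all [eq_comm]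

-- ===== VERDICT (by name: the statement is the Claim_ definition above) =====
theorem is_753_spec : Claim_equal_is_753 := by
  intro n _
  unfold Spec_is_753 is_753 is_753_alt
  simp only [is753Loop_spec]
  by_cases h3 : '3' ∈ PySem.Int.toChars n <;>
    by_cases h5 : '5' ∈ PySem.Int.toChars n <;>
      by_cases h7 : '7' ∈ PySem.Int.toChars n <;> simp_all
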